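-- pv_equiv track=rewrite | github.com/aYlasTeRy/Synthesis_of_systems_Bogatskaya | Num_9.py | move_ten
-- ===== SOURCE A (Python) =====
-- def move_ten(st):
--     key = 10
--     s = ""
--     for i in range(len(st)):
--         after = ord(st[i]) + key
--         if after > 122:
--             after -= 26
--         s += chr(after)
--
--     return s
-- ===== SOURCE B (Python) =====
-- def move_ten(st):
--     table = {}
--     for c in set(st):
--         after = ord(c) + 10
--         if after > 122:
--             after -= 26
--         table[ord(c)] = chr(after)
--     return st.translate(table)
-- ===== Notes on version B (the rewrite author's own statement) =====
-- stated objective: faster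
-- what changed: Replaces the index-by-index scan with repeated string concatenation by a translation table built once over the distinct characters plus a single bulk str.translate pass.
import Mathlib
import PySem

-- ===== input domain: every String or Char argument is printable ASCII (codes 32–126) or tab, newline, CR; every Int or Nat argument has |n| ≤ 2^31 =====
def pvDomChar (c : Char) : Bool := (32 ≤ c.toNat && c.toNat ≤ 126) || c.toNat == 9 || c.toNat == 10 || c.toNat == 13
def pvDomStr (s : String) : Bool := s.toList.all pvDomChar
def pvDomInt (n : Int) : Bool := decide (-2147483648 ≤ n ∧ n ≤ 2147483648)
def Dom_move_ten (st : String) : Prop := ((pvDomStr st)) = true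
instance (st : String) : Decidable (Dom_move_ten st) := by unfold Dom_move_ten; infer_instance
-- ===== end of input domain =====

-- B builds a {codepoint → shifted char} translation table from the distinct characters
-- and maps the string through it in one pass, instead of A's index loop with string append.

-- ===== PORT A =====
-- ord/chr are Char.toNat/Char.ofNat, exact on the codepoints reached here (< 0xD800).
def move_ten (st : String) : String :=
  String.mk ((PySem.List.pyRange 0 (st.toList.length : Int) 1).foldl
    (fun s i =>
      let after := (PySem.List.pyGetD st.toList i ' ').toNat + 10
      let after' := if after > 122 then after - 26 else after
      s ++ [Char.ofNat after']) [])

-- ===== PORT B =====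
def move_ten_alt (st : String) : String :=
  let table : PySem.Dict Nat Char :=
    (PySem.Set.ofList st.toList).foldl
      (fun d c =>
        let after := c.toNat + 10
        let after' := if after > 122 then after - 26 else after
        d.insert c.toNat (Char.ofNat after')) PySem.Dict.empty
  String.mk (st.toList.map (fun c => table.getD c.toNat c))

-- ===== PRECONDITION & SPEC =====
def Spec_move_ten (st : String) (out : String) : Prop := out = move_ten_alt st
instance (st : String) (out : String) : Decidable (Spec_move_ten st out) := by unfold Spec_move_ten; infer_instance

-- ===== CLAIM (what is proved, stated in full; the proofs are below) =====
def Claim_equal_move_ten : Prop := ∀ (st : String), Dom_move_ten st → Spec_move_ten st (move_ten st)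

-- ===== LEMMAS AND PROOFS =====

-- the common per-character shift
def pvShift (c : Char) : Char :=
  Char.ofNat (if c.toNat + 10 > 122 then c.toNat + 10 - 26 else c.toNat + 10)

lemma move_ten_eq_map (st : String) :
    move_ten st = String.mk (st.toList.map pvShift) := by
  unfold move_ten
  have hf : (fun (s : List Char) (i : Int) =>
      let after := (PySem.List.pyGetD st.toList i ' ').toNat + 10
      let after' := if after > 122 then after - 26 else after
      s ++ [Char.ofNat after'])
      = fun s i => s ++ [pvShift (PySem.List.pyGetD st.toList i ' ')] := by
    funext s i; simp only [pvShift]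
  rw [hf, PySem.List.foldl_pyRange_zero_pyGetD' st.toList ' '
        (fun s c => s ++ [pvShift c]) [],
      PySem.List.foldl_append_singleton_eq_map]
  simp

def pvTable (st : String) : PySem.Dict Nat Char :=
  (PySem.Set.ofList st.toList).foldl
    (fun d c => d.insert c.toNat (pvShift c)) PySem.Dict.empty

lemma table_getD (st : String) (c : Char) (hc : c ∈ st.toList) :
    (pvTable st).getD c.toNat c = pvShift c := by
  apply PySem.Dict.getD_of_mem_items
  · unfold pvTable
    rw [PySem.Dict.items_foldl_insert_fresh]
    · exact List.mem_map_of_mem ((PySem.Set.mem_ofList _ _).mpr hc)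
    · intro a _; simp
    · exact (PySem.Set.nodup_ofList st.toList).map
        (fun _ _ h => (StrictMono.injective (fun _ _ h => h) : Function.Injective Char.toNat) h)
  · exact PySem.Dict.nodup_keys_foldl_insert_key _ _ _ _ (by simp)

lemma move_ten_alt_eq_map (st : String) :
    move_ten_alt st = String.mk (st.toList.map pvShift) := by
  unfold move_ten_alt
  have hf : (fun (d : PySem.Dict Nat Char) (c : Char) =>
      let after := c.toNat + 10
      let after' := if after > 122 then after - 26 else after
      d.insert c.toNat (Char.ofNat after'))
      = fun d c => d.insert c.toNat (pvShift c) := by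
    funext d c; simp only [pvShift]
  rw [hf]
  show String.mk (st.toList.map (fun c => (pvTable st).getD c.toNat c))
      = String.mk (st.toList.map pvShift)
  exact congrArg String.mk (List.map_congr_left (fun c hc => table_getD st c hc))

-- ===== VERDICT (by name: the statement is the Claim_ definition above) =====
theorem move_ten_spec : Claim_equal_move_ten := by
  intro st _
  unfold Spec_move_ten
  rw [move_ten_eq_map, move_ten_alt_eq_map]
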